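-- pv_equiv track=rewrite | github.com/GregEPersonal/xpong | main.py | get_ball_bounce_count
-- ===== SOURCE A (Python) =====
-- def get_ball_bounce_count(events):
--     ball_bounce_count = 0
--     for event in events:
--         if event["type"] == "ball_bounce":
--             ball_bounce_count += 1
--         elif event["type"] == "point_scored":
--             ball_bounce_count = 0
--     return ball_bounce_count
-- ===== SOURCE B (Python) =====
-- def get_ball_bounce_count(events):
--     count = 0
--     for event in reversed(events):
--         t = event["type"]
--         if t == "point_scored":
--             break
--         if t == "ball_bounce":
--             count += 1
--     return count
-- ===== Notes on version B (the rewrite author's own statement) =====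
-- stated objective: alternative
-- what changed: B scans the events in reverse and stops at the first point_scored, counting only the trailing bounces, instead of A's forward fold that resets a counter on every point_scored.
import Mathlib
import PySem

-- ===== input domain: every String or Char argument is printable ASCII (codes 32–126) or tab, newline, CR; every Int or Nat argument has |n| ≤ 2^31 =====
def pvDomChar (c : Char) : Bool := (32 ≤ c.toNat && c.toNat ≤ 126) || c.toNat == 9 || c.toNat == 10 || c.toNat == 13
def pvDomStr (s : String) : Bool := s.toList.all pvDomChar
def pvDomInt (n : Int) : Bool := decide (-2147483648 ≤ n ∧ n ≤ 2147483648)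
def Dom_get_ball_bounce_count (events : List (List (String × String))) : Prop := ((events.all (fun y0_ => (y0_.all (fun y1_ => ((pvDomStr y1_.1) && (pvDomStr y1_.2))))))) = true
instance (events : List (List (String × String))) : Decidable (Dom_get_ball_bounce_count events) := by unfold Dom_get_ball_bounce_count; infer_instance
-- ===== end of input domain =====

-- B counts bounces by scanning the events in REVERSE and stopping at the first point_scored,
-- instead of A's forward fold that resets a counter; return values agree (proved), same O(n) cost.

-- ===== PORT A =====
-- forward loop: +1 on ball_bounce, reset to 0 on point_scored
def get_ball_bounce_count (events : List (List (String × String))) : Int :=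
  events.foldl
    (fun c e =>
      let t := ((PySem.Dict.mk e).get? "type").getD ""
      if t = "ball_bounce" then c + 1
      else if t = "point_scored" then 0
      else c) 0

-- ===== PORT B =====
-- accumulator loop over the reversed list; 'break' at point_scored = return the accumulator
def pvBbGo (acc : Int) : List (List (String × String)) → Int
  | [] => acc
  | e :: rest =>
    let t := ((PySem.Dict.mk e).get? "type").getD ""
    if t = "point_scored" then acc
    else pvBbGo (if t = "ball_bounce" then acc + 1 else acc) rest

def get_ball_bounce_count_alt (events : List (List (String × String))) : Int :=
  pvBbGo 0 events.reverse

-- ===== PRECONDITION & SPEC =====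
-- Pre_ excludes exactly the inputs where Python's event["type"] raises KeyError (in both A and B):
-- every event must carry a "type" key.
def Pre_get_ball_bounce_count (events : List (List (String × String))) : Prop :=
  ∀ e ∈ events, e.any (fun kv => kv.1 == "type") = true
instance (events : List (List (String × String))) : Decidable (Pre_get_ball_bounce_count events) := by
  unfold Pre_get_ball_bounce_count; infer_instance

def pvWitness_get_ball_bounce_count : (List (List (String × String))) :=
  [[("type", "ball_bounce")], [("type", "point_scored")], [("type", "ball_bounce")]]

def Spec_get_ball_bounce_count (events : List (List (String × String))) (out : Int) : Prop := out = get_ball_bounce_count_alt events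
instance (events : List (List (String × String))) (out : Int) : Decidable (Spec_get_ball_bounce_count events out) := by unfold Spec_get_ball_bounce_count; infer_instance

-- ===== CLAIM (what is proved, stated in full; the proofs are below) =====
def Claim_equal_get_ball_bounce_count : Prop := ∀ (events : List (List (String × String))), Dom_get_ball_bounce_count events → Pre_get_ball_bounce_count events → Spec_get_ball_bounce_count events (get_ball_bounce_count events)

-- ===== LEMMAS AND PROOFS =====

-- B's accumulator only adds on top of the result from a zero start
theorem pvBbGo_add (l : List (List (String × String))) :
    ∀ acc : Int, pvBbGo acc l = acc + pvBbGo 0 l := by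
  induction l with
  | nil => intro acc; simp [pvBbGo]
  | cons e rest ih =>
    intro acc
    simp only [pvBbGo]
    split_ifs with hp hb
    · ring
    · rw [ih (acc + 1), ih (0 + 1)]; ring
    · exact ih acc

-- forward fold from 0 = reverse scan with early stop
theorem pvFold_eq_rev (events : List (List (String × String))) :
    get_ball_bounce_count events = pvBbGo 0 events.reverse := by
  induction events using List.reverseRecOn with
  | nil => rfl
  | append_singleton xs x ih =>
    simp only [get_ball_bounce_count, List.foldl_append, List.foldl_cons, List.foldl_nil,
      List.reverse_append, List.reverse_cons, List.reverse_nil, List.nil_append,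
      List.cons_append, pvBbGo] at *
    split_ifs with hb hp hp
    · exact absurd hp (by rw [hb]; decide)
    · rw [pvBbGo_add, ih]; ring
    · rfl
    · rw [ih]

-- ===== VERDICT (by name: the statement is the Claim_ definition above) =====
theorem get_ball_bounce_count_spec : Claim_equal_get_ball_bounce_count := by
  intro events _ _
  unfold Spec_get_ball_bounce_count get_ball_bounce_count_alt
  exact pvFold_eq_rev events
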